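-- pv_equiv track=rewrite | github.com/AlbertoV5/Waveform | Version1/snaps.py | Structure
-- ===== SOURCE A (Python) =====
-- def BarVSGrid(bar):
--     scores = []
--     for b in range(0,len(bar)):
--         score = 0
--         for i in range(len(bar[b])):
--             if bar[b][i][1] != 0:
--                 score = score + 1
--         scores.append(score)
--     return scores
--
-- def Structure(snaps):
--     bar, unit = [],[]
--     for i in snaps:
--         x,y,z = i[0],i[1],i[2]
--         if x % 4 == 0:
--             bar.append(unit)
--             unit = []
--         unit.append([x,y,z])
--
--     scores = BarVSGrid(bar)
--     return scores
-- ===== SOURCE B (Python) =====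
-- def Structure(snaps):
--     scores = []
--     score = 0
--     for i in snaps:
--         x, y, z = i[0], i[1], i[2]
--         if x % 4 == 0:
--             scores.append(score)
--             score = 0
--         if y != 0:
--             score = score + 1
--     return scores
-- ===== Notes on version B (the rewrite author's own statement) =====
-- stated objective: simpler
-- what changed: Single pass with a running counter that is flushed to the output at each bar boundary, instead of materialising nested bar/unit lists and then counting them in a second pass (BarVSGrid).
import Mathlib
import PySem

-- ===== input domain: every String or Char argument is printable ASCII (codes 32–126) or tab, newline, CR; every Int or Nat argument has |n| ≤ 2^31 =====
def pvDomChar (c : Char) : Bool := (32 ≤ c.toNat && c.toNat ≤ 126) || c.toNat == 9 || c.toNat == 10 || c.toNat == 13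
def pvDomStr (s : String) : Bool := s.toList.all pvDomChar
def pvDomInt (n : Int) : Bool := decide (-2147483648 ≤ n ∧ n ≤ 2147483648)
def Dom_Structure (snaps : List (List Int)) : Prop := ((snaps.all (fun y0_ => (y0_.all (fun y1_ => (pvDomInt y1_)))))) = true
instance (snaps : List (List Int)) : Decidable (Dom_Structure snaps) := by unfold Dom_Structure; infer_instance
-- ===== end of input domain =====

-- B changes the decomposition only (one pass with a running counter, no intermediate
-- bar/unit lists); equivalence of the RETURN value is proved on inputs whose rows have
-- length ≥ 3 (Python A raises IndexError otherwise).

-- ===== PORT A =====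
-- helper BarVSGrid: per bar, count entries whose y (index 1) is nonzero
def BarVSGridA (bar : List (List (List Int))) : List Int :=
  bar.foldl (fun scores b =>
    scores ++ [b.foldl (fun score i =>
      if ((PySem.List.pyGet? i 1).getD 0) ≠ 0 then score + 1 else score) 0]) []

-- one loop iteration of A: state (bar, unit)
def stepA (s : List (List (List Int)) × List (List Int)) (i : List Int) :
    List (List (List Int)) × List (List Int) :=
  let x := (PySem.List.pyGet? i 0).getD 0
  let y := (PySem.List.pyGet? i 1).getD 0
  let z := (PySem.List.pyGet? i 2).getD 0
  let s' := if PySem.Int.mod x 4 = 0 then (s.1 ++ [s.2], ([] : List (List Int))) else s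
  (s'.1, s'.2 ++ [[x, y, z]])

def Structure (snaps : List (List Int)) : List Int :=
  BarVSGridA (snaps.foldl stepA ([], [])).1

-- ===== PORT B =====
-- one loop iteration of B: state (scores, score)
def stepB (s : List Int × Int) (i : List Int) : List Int × Int :=
  let x := (PySem.List.pyGet? i 0).getD 0
  let y := (PySem.List.pyGet? i 1).getD 0
  let _z := (PySem.List.pyGet? i 2).getD 0
  let s' := if PySem.Int.mod x 4 = 0 then (s.1 ++ [s.2], (0 : Int)) else s
  if y ≠ 0 then (s'.1, s'.2 + 1) else s'

def Structure_alt (snaps : List (List Int)) : List Int :=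
  (snaps.foldl stepB ([], 0)).1

-- ===== PRECONDITION & SPEC =====
-- Pre_: every row has at least 3 entries; Python A raises IndexError on shorter rows.
def Pre_Structure (snaps : List (List Int)) : Prop :=
  ∀ i ∈ snaps, 3 ≤ i.length
instance (snaps : List (List Int)) : Decidable (Pre_Structure snaps) := by
  unfold Pre_Structure; infer_instance

def pvWitness_Structure : List (List Int) := [[0, 1, 0], [1, 0, 0], [4, 2, 5]]

def Spec_Structure (snaps : List (List Int)) (out : List Int) : Prop := out = Structure_alt snaps
instance (snaps : List (List Int)) (out : List Int) : Decidable (Spec_Structure snaps out) := by unfold Spec_Structure; infer_instance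

-- ===== CLAIM (what is proved, stated in full; the proofs are below) =====
def Claim_equal_Structure : Prop := ∀ (snaps : List (List Int)), Dom_Structure snaps → Pre_Structure snaps → Spec_Structure snaps (Structure snaps)

-- ===== LEMMAS AND PROOFS =====

-- the per-unit count B maintains incrementally
def countY (u : List (List Int)) : Int :=
  u.foldl (fun score i =>
    if ((PySem.List.pyGet? i 1).getD 0) ≠ 0 then score + 1 else score) 0

lemma barVSGridA_eq_map (bar : List (List (List Int))) :
    BarVSGridA bar = bar.map countY := by
  show bar.foldl (fun scores b => scores ++ [countY b]) [] = bar.map countY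
  simpa using PySem.List.foldl_append_singleton_eq_map (f := countY) (l := bar)
    (acc := ([] : List Int))

lemma countY_append (u : List (List Int)) (i : List Int) :
    countY (u ++ [i]) =
      if ((PySem.List.pyGet? i 1).getD 0) ≠ 0 then countY u + 1 else countY u := by
  simp [countY]

lemma countY_singleton (x y z : Int) :
    countY [[x, y, z]] = if y ≠ 0 then 1 else 0 := by
  simp [countY, PySem.List.pyGet?, PySem.List.pyIdx?]

-- loop invariant: B's state is the image of A's state under (map countY, countY)
lemma invariant (l : List (List Int)) :
    ∀ (bar : List (List (List Int))) (unit : List (List Int)),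
      l.foldl stepB (bar.map countY, countY unit) =
        (((l.foldl stepA (bar, unit)).1).map countY, countY (l.foldl stepA (bar, unit)).2) := by
  induction l with
  | nil => intro bar unit; simp
  | cons i t ih =>
    intro bar unit
    simp only [List.foldl_cons]
    have hstep : stepB (bar.map countY, countY unit) i =
        ((stepA (bar, unit) i).1.map countY, countY (stepA (bar, unit) i).2) := by
      by_cases hx : (4 : Int) ∣ (PySem.List.pyGet? i 0).getD 0 <;>
        by_cases hy : ((PySem.List.pyGet? i 1).getD 0) = 0 <;>
          simp [stepA, stepB, hx, hy, countY_append,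
            countY_singleton]
    rw [hstep]
    rcases h : stepA (bar, unit) i with ⟨bar', unit'⟩
    exact ih bar' unit'

-- ===== VERDICT (by name: the statement is the Claim_ definition above) =====
theorem Structure_spec : Claim_equal_Structure := by
  intro snaps _ _
  unfold Spec_Structure Structure Structure_alt
  rw [barVSGridA_eq_map]
  have h := invariant snaps [] []
  simpa [countY] using congrArg Prod.fst h.symm
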